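-- pv_equiv track=rewrite | github.com/cmbenello/141-discussion-final | solutions/recursion_lists_sols.py | rl_09_index_of_first
-- ===== SOURCE A (Python) =====
-- from typing import Any, List, Optional, Tuple
--
-- def rl_09_index_of_first(xs: List[Any], target: Any) -> Optional[int]:
--     if not xs:
--         return None
--     if xs[0] == target:
--         return 0
--     tail_index = rl_09_index_of_first(xs[1:], target)
--     if tail_index is None:
--         return None
--     return 1 + tail_index
-- ===== SOURCE B (Python) =====
-- from typing import Any, List, Optional
--
-- def rl_09_index_of_first(xs: List[Any], target: Any) -> Optional[int]:
--     for i, x in enumerate(xs):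
--         if x == target:
--             return i
--     return None
-- ===== Notes on version B (the rewrite author's own statement) =====
-- stated objective: faster
-- what changed: Replaced the slice-building recursion (which copies the tail at every step) with a single flat enumerate loop returning the index on the first match.
import Mathlib
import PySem

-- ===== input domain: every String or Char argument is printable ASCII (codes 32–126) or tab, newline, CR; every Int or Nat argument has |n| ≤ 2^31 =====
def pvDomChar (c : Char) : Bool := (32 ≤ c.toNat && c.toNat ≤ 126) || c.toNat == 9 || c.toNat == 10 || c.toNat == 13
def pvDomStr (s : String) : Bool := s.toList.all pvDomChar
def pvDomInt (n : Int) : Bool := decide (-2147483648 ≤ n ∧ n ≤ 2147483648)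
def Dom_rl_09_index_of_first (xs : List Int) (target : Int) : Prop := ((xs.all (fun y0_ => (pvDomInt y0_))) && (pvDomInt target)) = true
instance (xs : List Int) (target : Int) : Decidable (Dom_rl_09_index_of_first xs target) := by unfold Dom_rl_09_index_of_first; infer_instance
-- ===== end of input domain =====

-- B replaces A's tail-slice recursion (quadratic copying) by one flat indexed scan; objective: faster.

-- ===== PORT A =====
-- literal transliteration: empty → none; head match → 0; else recurse on tail slice and add 1
def rl_09_index_of_first (xs : List Int) (target : Int) : Option Int :=
  match xs with
  | [] => none
  | x :: rest =>
    if x = target then some 0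
    else
      match rl_09_index_of_first rest target with
      | none => none
      | some tailIndex => some (1 + tailIndex)

-- ===== PORT B =====
-- helper: the enumerate loop, carrying the current index
def rl09AltGo (i : Int) (xs : List Int) (target : Int) : Option Int :=
  match xs with
  | [] => none
  | x :: rest => if x = target then some i else rl09AltGo (i + 1) rest target

def rl_09_index_of_first_alt (xs : List Int) (target : Int) : Option Int :=
  rl09AltGo 0 xs target

-- ===== PRECONDITION & SPEC =====
def Spec_rl_09_index_of_first (xs : List Int) (target : Int) (out : Option Int) : Prop := out = rl_09_index_of_first_alt xs target
instance (xs : List Int) (target : Int) (out : Option Int) : Decidable (Spec_rl_09_index_of_first xs target out) := by unfold Spec_rl_09_index_of_first; infer_instance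

-- ===== CLAIM (what is proved, stated in full; the proofs are below) =====
def Claim_equal_rl_09_index_of_first : Prop := ∀ (xs : List Int) (target : Int), Dom_rl_09_index_of_first xs target → Spec_rl_09_index_of_first xs target (rl_09_index_of_first xs target)

-- ===== LEMMAS AND PROOFS =====
theorem rl09_go_eq (xs : List Int) (target : Int) : ∀ i : Int,
    rl09AltGo i xs target = (rl_09_index_of_first xs target).map (fun j => i + j) := by
  induction xs with
  | nil => intro i; rfl
  | cons x rest ih =>
    intro i
    simp only [rl09AltGo, rl_09_index_of_first]
    split_ifs with h
    · simp
    · rw [ih]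
      cases rl_09_index_of_first rest target with
      | none => rfl
      | some j => simp; ring

-- ===== VERDICT (by name: the statement is the Claim_ definition above) =====
theorem rl_09_index_of_first_spec : Claim_equal_rl_09_index_of_first := by
  intro xs target _
  unfold Spec_rl_09_index_of_first rl_09_index_of_first_alt
  rw [rl09_go_eq]
  cases rl_09_index_of_first xs target with
  | none => rfl
  | some j => simp
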